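-- pv_equiv track=rewrite | github.com/KKosukeee/CodingQuestions | LeetCode/1311_get_watched_videos_by_your_friends.py | short_bfs
-- ===== SOURCE A (Python) =====
-- from collections import Counter
-- from collections import deque
-- from typing import List
--
-- def short_bfs(watchedVideos: List[List[str]], friends: List[List[int]],
--               id: int, level: int) -> List[str]:
--   """
--   A solution using a BFS that runs in O(N+Mlog(M)) where N = # of friends and
--   M = # of videos in time and O(N+M) in space
--
--   Args:
--     watchedVideos:
--     friends:
--     id:
--     level:
--
--   Returns:
--
--   """
--   visited, q = set([id]), deque([id])
--   for _ in range(level):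
--     q = {j for i in q for j in friends[i] if j not in visited}
--     visited |= q
--   counter = Counter([video for i in q for video in watchedVideos[i]])
--   return sorted(counter.keys(), key=lambda x: (counter[x], x))
-- ===== SOURCE B (Python) =====
-- from typing import List
--
--
-- def short_bfs(watchedVideos: List[List[str]], friends: List[List[int]],
--               id: int, level: int) -> List[str]:
--   """Reachability-closure formulation: grow the set of nodes reachable within
--   k steps monotonically (no visited-filtered frontier); the level-th frontier
--   is the difference of the last two closures.  Counting is done by sorting the
--   video list and run-length grouping instead of a Counter, and the final order
--   comes from a plain lexicographic sort of (count, video) pairs."""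
--   reach, prev = {id}, set()
--   for _ in range(level):
--     prev = reach
--     reach = reach | {j for i in reach for j in friends[i]}
--   frontier = reach - prev
--   vids = sorted(v for i in frontier for v in watchedVideos[i])
--   res = []
--   i = 0
--   while i < len(vids):
--     j = i
--     while j < len(vids) and vids[j] == vids[i]:
--       j += 1
--     res.append((j - i, vids[i]))
--     i = j
--   res.sort()
--   return [v for _, v in res]
-- ===== Notes on version B (the rewrite author's own statement) =====
-- stated objective: alternative
-- what changed: Replaces the visited-filtered frontier BFS plus Counter/key-sort by a monotone reachability-closure iteration (reach_k = nodes within k steps, frontier = reach_level minus reach_level-1) and counts by sorting the video list and run-length grouping, then lexicographically sorting (count, video) pairs.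
-- outside the precondition, e.g. on short_bfs([['a'], ['b']], [[], [5]], 0, 1): A returns [], B returns []; on short_bfs([['a'], ['b']], [[1], [7]], 0, 1): A returns ['b'], B returns ['b']
import Mathlib
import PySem

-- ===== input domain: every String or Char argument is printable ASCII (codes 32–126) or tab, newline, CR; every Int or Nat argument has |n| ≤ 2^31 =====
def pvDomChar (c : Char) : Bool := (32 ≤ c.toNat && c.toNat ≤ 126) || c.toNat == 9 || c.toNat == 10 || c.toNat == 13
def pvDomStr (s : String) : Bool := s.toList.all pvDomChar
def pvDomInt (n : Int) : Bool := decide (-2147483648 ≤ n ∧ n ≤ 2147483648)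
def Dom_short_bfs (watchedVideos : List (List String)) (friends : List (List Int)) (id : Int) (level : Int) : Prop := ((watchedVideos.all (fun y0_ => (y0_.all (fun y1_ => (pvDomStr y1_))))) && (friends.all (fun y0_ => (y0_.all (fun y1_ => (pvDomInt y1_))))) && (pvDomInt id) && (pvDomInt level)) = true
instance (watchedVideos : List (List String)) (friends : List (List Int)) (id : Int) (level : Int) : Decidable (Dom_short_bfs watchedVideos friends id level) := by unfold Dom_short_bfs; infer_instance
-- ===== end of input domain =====

-- B replaces A's visited-filtered frontier BFS + Counter/key-sort by a monotone reachability
-- closure (frontier = reach_level \ reach_{level-1}) and sort-then-run-length-group counting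
-- (objective: alternative algorithm, similar cost).

-- ===== PORT A =====
-- q = {j for i in q for j in friends[i] if j not in visited}
def shortStep (friends : List (List Int)) (visited : PySem.Set Int) (q : List Int) : PySem.Set Int :=
  q.foldl (fun acc i =>
      (PySem.List.pyGetD friends i []).foldl
        (fun acc j => if visited.contains j then acc else acc.add j) acc)
    PySem.Set.empty

-- for _ in range(level): q = {…}; visited |= q
def shortLoop (friends : List (List Int)) : Nat → PySem.Set Int → List Int → List Int
  | 0, _, q => q
  | n + 1, visited, q =>
      let q' := shortStep friends visited q
      shortLoop friends n (PySem.Set.union visited q') q'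

def short_bfs (watchedVideos : List (List String)) (friends : List (List Int)) (id : Int) (level : Int) : List String :=
  let q := shortLoop friends level.toNat (PySem.Set.ofList [id]) [id]
  let videos := q.foldl (fun acc i => acc ++ PySem.List.pyGetD watchedVideos i []) []
  let counter := PySem.Dict.counter videos
  PySem.List.sorted2 counter.keys (fun x => counter.getD x 0) (fun x => x)

-- ===== PORT B =====
-- {j for i in reach for j in friends[i]}
def altNbrs (friends : List (List Int)) (reach : PySem.Set Int) : PySem.Set Int :=
  reach.foldl (fun acc i => PySem.Set.update acc (PySem.List.pyGetD friends i [])) PySem.Set.empty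

-- for _ in range(level): prev = reach; reach = reach | {…}
def altClosure (friends : List (List Int)) : Nat → PySem.Set Int → PySem.Set Int → PySem.Set Int × PySem.Set Int
  | 0, reach, prev0 => (reach, prev0)
  | n + 1, reach, _prev => altClosure friends n (PySem.Set.union reach (altNbrs friends reach)) reach

-- the two nested while loops: scan a run of equal videos, emit (run length, video)
def groupRuns : List String → List (Int × String)
  | [] => []
  | x :: xs =>
      (((xs.takeWhile (· == x)).length : Int) + 1, x) :: groupRuns (xs.dropWhile (· == x))
  termination_by l => l.length
  decreasing_by simpa using Nat.lt_succ_of_le (List.length_dropWhile_le _ xs)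

def short_bfs_alt (watchedVideos : List (List String)) (friends : List (List Int)) (id : Int) (level : Int) : List String :=
  let rp := altClosure friends level.toNat (PySem.Set.ofList [id]) PySem.Set.empty
  let frontier := PySem.Set.diff rp.1 rp.2
  let vids := PySem.List.sorted (frontier.flatMap (fun i => PySem.List.pyGetD watchedVideos i [])) (fun v => v)
  let res := PySem.List.sorted2 (groupRuns vids) (fun p => p.1) (fun p => p.2)
  res.map (fun p => p.2)

-- ===== PRECONDITION & SPEC =====
-- Pre_ requires id's indices in range and, when level > 0 (the only case in which either program
-- indexes with friend entries), every friend entry in range for both lists: this rules out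
-- IndexError without simulating which nodes the BFS actually reaches (so it also excludes some
-- inputs with unreached out-of-range entries, on which A returns and B returns the same value).
def Pre_short_bfs (watchedVideos : List (List String)) (friends : List (List Int)) (id : Int) (level : Int) : Prop :=
  PySem.Raise.InRange watchedVideos.length id ∧
    (0 < level → PySem.Raise.InRange friends.length id ∧
      ∀ l ∈ friends, ∀ j ∈ l, PySem.Raise.InRange watchedVideos.length j ∧ PySem.Raise.InRange friends.length j)
instance (watchedVideos : List (List String)) (friends : List (List Int)) (id : Int) (level : Int) : Decidable (Pre_short_bfs watchedVideos friends id level) := by unfold Pre_short_bfs; infer_instance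

def pvWitness_short_bfs : List (List String) × List (List Int) × Int × Int :=
  ([["a"], ["b", "c"]], [[1], [0]], 0, 1)

def Spec_short_bfs (watchedVideos : List (List String)) (friends : List (List Int)) (id : Int) (level : Int) (out : List String) : Prop := out = short_bfs_alt watchedVideos friends id level
instance (watchedVideos : List (List String)) (friends : List (List Int)) (id : Int) (level : Int) (out : List String) : Decidable (Spec_short_bfs watchedVideos friends id level out) := by unfold Spec_short_bfs; infer_instance

-- ===== CLAIM (what is proved, stated in full; the proofs are below) =====
def Claim_equal_short_bfs : Prop := ∀ (watchedVideos : List (List String)) (friends : List (List Int)) (id : Int) (level : Int), Dom_short_bfs watchedVideos friends id level → Pre_short_bfs watchedVideos friends id level → Spec_short_bfs watchedVideos friends id level (short_bfs watchedVideos friends id level)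

-- ===== LEMMAS AND PROOFS =====

-- membership in A's filtered inner fold
theorem mem_inner (l : List Int) (v : PySem.Set Int) :
    ∀ (acc : List Int) (x : Int),
      x ∈ l.foldl (fun acc j => if v.contains j then acc else PySem.Set.add acc j) acc
        ↔ x ∈ acc ∨ (x ∈ l ∧ x ∉ v) := by
  induction l with
  | nil => intro acc x; simp
  | cons j l ih =>
      intro acc x
      simp only [List.foldl_cons]
      by_cases hc : v.contains j = true
      · rw [if_pos hc, ih]
        have hj : j ∈ v := (PySem.Set.contains_iff v j).mp hc
        constructor
        · rintro (h | ⟨h1, h2⟩)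
          · exact Or.inl h
          · exact Or.inr ⟨List.mem_cons_of_mem _ h1, h2⟩
        · rintro (h | ⟨h1, h2⟩)
          · exact Or.inl h
          · rcases List.mem_cons.mp h1 with h1 | h1
            · exact absurd (h1 ▸ hj) h2
            · exact Or.inr ⟨h1, h2⟩
      · rw [if_neg hc, ih]
        have hj : j ∉ v := fun h => hc ((PySem.Set.contains_iff v j).mpr h)
        simp only [PySem.Set.mem_add, List.mem_cons]
        constructor
        · rintro ((h | h) | ⟨h1, h2⟩)
          · exact Or.inl h
          · exact Or.inr ⟨Or.inl h, h ▸ hj⟩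
          · exact Or.inr ⟨Or.inr h1, h2⟩
        · rintro (h | ⟨(h1 | h1), h2⟩)
          · exact Or.inl (Or.inl h)
          · exact Or.inl (Or.inr h1)
          · exact Or.inr ⟨h1, h2⟩

theorem nodup_inner (l : List Int) (v : PySem.Set Int) :
    ∀ (acc : List Int), acc.Nodup →
      (l.foldl (fun acc j => if v.contains j then acc else PySem.Set.add acc j) acc).Nodup := by
  induction l with
  | nil => intro acc h; exact h
  | cons j l ih =>
      intro acc h
      simp only [List.foldl_cons]
      by_cases hc : v.contains j = true
      · rw [if_pos hc]; exact ih acc h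
      · rw [if_neg hc]; exact ih _ (PySem.Set.nodup_add acc j h)

-- membership in A's per-level frontier set
theorem mem_shortStep (friends : List (List Int)) (v : PySem.Set Int) (q : List Int) (x : Int) :
    x ∈ shortStep friends v q ↔ (∃ i ∈ q, x ∈ PySem.List.pyGetD friends i []) ∧ x ∉ v := by
  have aux : ∀ (q acc : List Int),
      x ∈ q.foldl (fun acc i =>
          (PySem.List.pyGetD friends i []).foldl
            (fun acc j => if v.contains j then acc else PySem.Set.add acc j) acc) acc
        ↔ x ∈ acc ∨ ((∃ i ∈ q, x ∈ PySem.List.pyGetD friends i []) ∧ x ∉ v) := by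
    intro q
    induction q with
    | nil => intro acc; simp
    | cons i q ih =>
        intro acc
        simp only [List.foldl_cons]
        rw [ih, mem_inner]
        constructor
        · rintro ((h | ⟨h1, h2⟩) | ⟨⟨i', hi', hx⟩, h2⟩)
          · exact Or.inl h
          · exact Or.inr ⟨⟨i, List.mem_cons_self .., h1⟩, h2⟩
          · exact Or.inr ⟨⟨i', List.mem_cons_of_mem _ hi', hx⟩, h2⟩
        · rintro (h | ⟨⟨i', hi', hx⟩, h2⟩)
          · exact Or.inl (Or.inl h)
          · rcases List.mem_cons.mp hi' with h1 | h1
            · exact Or.inl (Or.inr ⟨h1 ▸ hx, h2⟩)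
            · exact Or.inr ⟨⟨i', h1, hx⟩, h2⟩
  rw [shortStep, aux]
  simp [PySem.Set.empty]

theorem nodup_shortStep (friends : List (List Int)) (v : PySem.Set Int) (q : List Int) :
    (shortStep friends v q).Nodup := by
  rw [shortStep]
  generalize hacc : PySem.Set.empty = acc
  have hnd : acc.Nodup := hacc ▸ List.nodup_nil
  clear hacc
  induction q generalizing acc with
  | nil => exact hnd
  | cons i q ih => exact ih _ (nodup_inner _ v acc hnd)

-- membership in B's neighbourhood set
theorem mem_altNbrs (friends : List (List Int)) (r : PySem.Set Int) (x : Int) :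
    x ∈ altNbrs friends r ↔ ∃ i ∈ r, x ∈ PySem.List.pyGetD friends i [] := by
  have aux : ∀ (q acc : List Int),
      x ∈ q.foldl (fun acc i => PySem.Set.update acc (PySem.List.pyGetD friends i [])) acc
        ↔ x ∈ acc ∨ ∃ i ∈ q, x ∈ PySem.List.pyGetD friends i [] := by
    intro q
    induction q with
    | nil => intro acc; simp
    | cons i q ih =>
        intro acc
        simp only [List.foldl_cons]
        rw [ih, PySem.Set.mem_update]
        constructor
        · rintro ((h | h) | ⟨i', hi', hx⟩)
          · exact Or.inl h
          · exact Or.inr ⟨i, List.mem_cons_self .., h⟩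
          · exact Or.inr ⟨i', List.mem_cons_of_mem _ hi', hx⟩
        · rintro (h | ⟨i', hi', hx⟩)
          · exact Or.inl (Or.inl h)
          · rcases List.mem_cons.mp hi' with h1 | h1
            · exact Or.inl (Or.inr (h1 ▸ hx))
            · exact Or.inr ⟨i', h1, hx⟩
  rw [altNbrs, aux]
  simp [PySem.Set.empty]

theorem nodup_shortLoop (friends : List (List Int)) :
    ∀ (n : Nat) (v : PySem.Set Int) (q : List Int), q.Nodup → (shortLoop friends n v q).Nodup := by
  intro n
  induction n with
  | zero => intro v q h; exact h
  | succ n ih => intro v q _; exact ih _ _ (nodup_shortStep friends v q)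

theorem nodup_altClosure (friends : List (List Int)) :
    ∀ (n : Nat) (reach prev : PySem.Set Int), reach.Nodup → prev.Nodup →
      (altClosure friends n reach prev).1.Nodup ∧ (altClosure friends n reach prev).2.Nodup := by
  intro n
  induction n with
  | zero => intro reach prev h1 h2; exact ⟨h1, h2⟩
  | succ n ih =>
      intro reach prev h1 h2
      exact ih _ _ (PySem.Set.nodup_union _ _ h1) h1

-- the BFS invariant: A's frontier is exactly reach \ prev
theorem loop_mem (friends : List (List Int)) :
    ∀ (n : Nat) (v : PySem.Set Int) (q : List Int) (reach prev : PySem.Set Int),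
      (∀ x : Int, x ∈ v ↔ x ∈ reach) →
      (∀ x : Int, x ∈ q ↔ x ∈ reach ∧ x ∉ prev) →
      (∀ x : Int, x ∈ prev → x ∈ reach) →
      (∀ x : Int, (∃ i ∈ prev, x ∈ PySem.List.pyGetD friends i []) → x ∈ reach) →
      ∀ x : Int, x ∈ shortLoop friends n v q ↔
        x ∈ (altClosure friends n reach prev).1 ∧ x ∉ (altClosure friends n reach prev).2 := by
  intro n
  induction n with
  | zero =>
      intro v q reach prev Hvr Hq Hp HN x
      simpa [shortLoop, altClosure] using Hq x
  | succ n ih =>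
      intro v q reach prev Hvr Hq Hp HN x
      show x ∈ shortLoop friends n (PySem.Set.union v (shortStep friends v q)) (shortStep friends v q) ↔ _
      have hreach : ∀ y : Int, y ∈ reach ↔ y ∈ prev ∨ y ∈ q := by
        intro y
        constructor
        · intro h
          by_cases hp : y ∈ prev
          · exact Or.inl hp
          · exact Or.inr ((Hq y).mpr ⟨h, hp⟩)
        · rintro (h | h)
          · exact Hp y h
          · exact ((Hq y).mp h).1
      refine ih (PySem.Set.union v (shortStep friends v q)) (shortStep friends v q)
        (PySem.Set.union reach (altNbrs friends reach)) reach ?_ ?_ ?_ ?_ x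
      · -- visited' ≈ reach'
        intro y
        rw [PySem.Set.mem_union, PySem.Set.mem_union, mem_shortStep, mem_altNbrs, Hvr]
        constructor
        · rintro (h | ⟨⟨i, hi, hy⟩, h2⟩)
          · exact Or.inl h
          · exact Or.inr ⟨i, ((Hq i).mp hi).1, hy⟩
        · rintro (h | ⟨i, hi, hy⟩)
          · exact Or.inl h
          · rcases (hreach i).mp hi with h1 | h1
            · exact Or.inl (HN y ⟨i, h1, hy⟩)
            · by_cases hv : y ∈ reach
              · exact Or.inl hv
              · exact Or.inr ⟨⟨i, h1, hy⟩, hv⟩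
      · -- frontier' = reach' \ prev'
        intro y
        rw [mem_shortStep, PySem.Set.mem_union, mem_altNbrs, Hvr]
        constructor
        · rintro ⟨⟨i, hi, hy⟩, h2⟩
          exact ⟨Or.inr ⟨i, ((Hq i).mp hi).1, hy⟩, h2⟩
        · rintro ⟨(h | ⟨i, hi, hy⟩), h2⟩
          · exact absurd h h2
          · rcases (hreach i).mp hi with h1 | h1
            · exact absurd (HN y ⟨i, h1, hy⟩) h2
            · exact ⟨⟨i, h1, hy⟩, h2⟩
      · intro y h
        exact (PySem.Set.mem_union _ _ y).mpr (Or.inl h)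
      · intro y h
        exact (PySem.Set.mem_union _ _ y).mpr (Or.inr ((mem_altNbrs friends reach y).mpr h))

-- sorted2 is sorting by the lexicographic pair key
theorem sorted2_eq_sorted_toLex {α κ₁ κ₂ : Type} [LinearOrder κ₁] [LinearOrder κ₂]
    (xs : List α) (k1 : α → κ₁) (k2 : α → κ₂) :
    PySem.List.sorted2 xs k1 k2 = PySem.List.sorted xs (fun x => toLex (k1 x, k2 x)) := by
  have hb : (fun a b => decide (k1 a < k1 b) || (!decide (k1 b < k1 a) && decide (k2 a < k2 b)))
      = fun a b : α => decide (toLex (k1 a, k2 a) < toLex (k1 b, k2 b)) := by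
    funext a b
    rcases lt_trichotomy (k1 a) (k1 b) with h | h | h
    · simp [Prod.Lex.toLex_lt_toLex, h, h.ne, not_lt_of_gt h]
    · simp [Prod.Lex.toLex_lt_toLex, h]
    · simp [Prod.Lex.toLex_lt_toLex, h, h.ne', not_lt_of_gt h]
  simp only [PySem.List.sorted2, PySem.List.sorted, if_neg (by decide : ¬(false = true))]
  rw [hb]

-- on a sorted list, the head's whole run is its takeWhile prefix
theorem not_mem_dropWhile (x : String) :
    ∀ (xs : List String), (x :: xs).Pairwise (fun a b => a ≤ b) →
      x ∉ xs.dropWhile (fun y => y == x) := by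
  intro xs
  induction xs with
  | nil => intro _ h; simp at h
  | cons a r ih =>
      intro hpw h
      rcases List.pairwise_cons.mp hpw with ⟨hx, hpar⟩
      by_cases ha : (a == x) = true
      · simp only [List.dropWhile_cons, ha, if_true] at h
        refine ih (List.pairwise_cons.mpr ⟨?_, (List.pairwise_cons.mp hpar).2⟩) h
        intro y hy
        exact hx y (List.mem_cons_of_mem _ hy)
      · simp only [List.dropWhile_cons, ha] at h
        have hax : a ≠ x := fun he => ha (by simp [he])
        rcases List.mem_cons.mp h with h1 | h1
        · exact hax h1.symm
        · have h2 : a ≤ x := (List.pairwise_cons.mp hpar).1 x h1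
          have h3 : x ≤ a := hx a (List.mem_cons_self ..)
          exact hax (le_antisymm h2 h3)

-- run-length grouping of a sorted list = (count, value) over its distinct values
theorem groupRuns_perm :
    ∀ (S : List String), S.Pairwise (fun a b => a ≤ b) →
      (groupRuns S).Perm ((PySem.Set.ofList S).map (fun v => ((S.count v : Int), v))) := by
  intro S
  induction S using groupRuns.induct with
  | case1 => intro _; simp [groupRuns]
  | case2 x xs ih =>
      intro hpw
      have hsplit : xs.takeWhile (fun y => y == x) ++ xs.dropWhile (fun y => y == x) = xs :=
        List.takeWhile_append_dropWhile
      set t := xs.takeWhile (fun y => y == x) with ht_def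
      set d := xs.dropWhile (fun y => y == x) with hd_def
      have ht : ∀ y ∈ t, y = x := by
        intro y hy
        have := List.mem_takeWhile_imp hy
        simpa using this
      have hxd : x ∉ d := not_mem_dropWhile x xs hpw
      have hd_pw : d.Pairwise (fun a b => a ≤ b) :=
        List.Pairwise.sublist (List.dropWhile_sublist _) (List.Pairwise.of_cons hpw)
      have hct : t.count x = t.length := List.count_eq_length.mpr fun b hb => (ht b hb).symm
      have hcx : (x :: xs).count x = t.length + 1 := by
        rw [List.count_cons_self, ← hsplit, List.count_append, hct,
          List.count_eq_zero.mpr hxd]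
      have hcv : ∀ v ∈ d, (x :: xs).count v = d.count v := by
        intro v hv
        have hvx : v ≠ x := fun he => hxd (he ▸ hv)
        have hvt : v ∉ t := fun hvt => hvx (ht v hvt)
        rw [← hsplit]
        simp [List.count_append, Ne.symm hvx, List.count_eq_zero.mpr hvt]
      have hmapd : (PySem.Set.ofList d).map (fun v => ((d.count v : Int), v))
          = (PySem.Set.ofList d).map (fun v => (((x :: xs).count v : Int), v)) := by
        refine List.map_congr_left fun v hv => ?_
        rw [hcv v ((PySem.Set.mem_ofList d v).mp hv)]
      have hsetperm : (x :: PySem.Set.ofList d).Perm (PySem.Set.ofList (x :: xs)) := by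
        refine (List.perm_ext_iff_of_nodup ?_ (PySem.Set.nodup_ofList _)).mpr ?_
        · exact List.nodup_cons.mpr
            ⟨fun h => hxd ((PySem.Set.mem_ofList d x).mp h), PySem.Set.nodup_ofList d⟩
        · intro y
          rw [List.mem_cons, PySem.Set.mem_ofList, PySem.Set.mem_ofList, List.mem_cons]
          constructor
          · rintro (h | h)
            · exact Or.inl h
            · exact Or.inr (by rw [← hsplit]; exact List.mem_append_right _ h)
          · rintro (h | h)
            · exact Or.inl h
            · rw [← hsplit] at h
              rcases List.mem_append.mp h with h1 | h1
              · exact Or.inl (ht y h1)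
              · exact Or.inr h1
      rw [groupRuns, ← ht_def, ← hd_def]
      have hstep : (((t.length : Int) + 1, x) :: groupRuns d).Perm
          ((x :: PySem.Set.ofList d).map (fun v => (((x :: xs).count v : Int), v))) := by
        rw [List.map_cons, hcx]
        push_cast
        exact List.Perm.cons _ (by rw [← hmapd]; exact ih hd_pw)
      exact hstep.trans (hsetperm.map _)

-- a sort with an injective key of a duplicate-free list is strictly increasing
theorem sorted_strict {α κ : Type} [LinearOrder κ] (L : List α) (key : α → κ)
    (hL : L.Nodup) (hinj : Function.Injective key) :
    (PySem.List.sorted L key).Pairwise (fun a b => key a < key b) := by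
  have hnd : (PySem.List.sorted L key).Nodup :=
    (PySem.List.sorted_perm L key false).symm.nodup hL
  have hle := PySem.List.sorted_pairwise L key
  exact (hle.and hnd).imp fun h => h.1.lt_of_ne fun he => h.2 (hinj he)

-- ===== VERDICT (by name: the statement is the Claim_ definition above) =====
theorem short_bfs_spec : Claim_equal_short_bfs := by
  intro wv friends id level _hdom _hpre
  unfold Spec_short_bfs
  simp only [short_bfs, short_bfs_alt]
  set n := level.toNat with hn
  set qA := shortLoop friends n (PySem.Set.ofList [id]) [id] with hqA
  set rp := altClosure friends n (PySem.Set.ofList [id]) PySem.Set.empty with hrp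
  set F := PySem.Set.diff rp.1 rp.2 with hF
  set g := fun i => PySem.List.pyGetD wv i [] with hg
  -- the two frontiers hold the same nodes
  have hmem := loop_mem friends n (PySem.Set.ofList [id]) [id] (PySem.Set.ofList [id]) PySem.Set.empty
    (fun x => Iff.rfl)
    (fun x => by simp [PySem.Set.mem_ofList, PySem.Set.empty])
    (fun x hx => by simp [PySem.Set.empty] at hx)
    (fun x hx => by simp [PySem.Set.empty] at hx)
  have hndA : qA.Nodup := nodup_shortLoop friends n _ _ (List.nodup_singleton id)
  have hndr := nodup_altClosure friends n (PySem.Set.ofList [id]) PySem.Set.empty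
    (PySem.Set.nodup_ofList _) (by simp [PySem.Set.empty])
  have hndF : F.Nodup := PySem.Set.nodup_diff _ _ hndr.1
  have hperm : qA.Perm F := (List.perm_ext_iff_of_nodup hndA hndF).mpr
    (fun a => by rw [hF, PySem.Set.mem_diff]; exact hmem a)
  -- the two video multisets are permutations
  set VA := qA.flatMap g with hVA
  set VB := F.flatMap g with hVB
  have hfold : qA.foldl (fun acc i => acc ++ g i) [] = VA := by
    simpa using PySem.List.foldl_append_eq_flatMap g qA []
  have hVperm : VA.Perm VB := hperm.flatMap (fun a _ => List.Perm.refl _)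
  rw [hfold, PySem.Dict.keys_counter, sorted2_eq_sorted_toLex, sorted2_eq_sorted_toLex]
  set keyA := fun v : String => toLex ((VA.count v : Int), v) with hkeyA
  have hkey : (fun v : String => toLex ((PySem.Dict.counter VA).getD v 0, v)) = keyA := by
    funext v
    rw [PySem.Dict.getD_counter]
  rw [hkey]
  set L := PySem.Set.ofList VA with hL
  -- B's sorted video list and its grouping
  set S := PySem.List.sorted VB (fun v => v) with hS
  have hS_pw : S.Pairwise (fun a b => a ≤ b) := PySem.List.sorted_pairwise VB (fun v => v)
  have hSVB : S.Perm VB := PySem.List.sorted_perm VB (fun v => v) false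
  have hSVA : S.Perm VA := hSVB.trans hVperm.symm
  have hcount : (fun v => ((S.count v : Int), v)) = fun v => ((VA.count v : Int), v) := by
    funext v
    rw [hSVA.count_eq]
  have hLperm : (PySem.Set.ofList S).Perm L := by
    refine (List.perm_ext_iff_of_nodup (PySem.Set.nodup_ofList _) (PySem.Set.nodup_ofList _)).mpr ?_
    intro a
    rw [PySem.Set.mem_ofList, PySem.Set.mem_ofList]
    exact ⟨fun h => hSVA.mem_iff.mp h, fun h => hSVA.mem_iff.mpr h⟩
  set fA := fun v : String => ((VA.count v : Int), v) with hfA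
  have hGL : (groupRuns S).Perm (L.map fA) := by
    refine (groupRuns_perm S hS_pw).trans ?_
    rw [hcount]
    exact hLperm.map _
  set keyP := fun p : Int × String => toLex (p.1, p.2) with hkeyP
  have hinjP : Function.Injective keyP := by
    intro p q h
    have h1 : ((ofLex (keyP p)).1, (ofLex (keyP p)).2) = ((ofLex (keyP q)).1, (ofLex (keyP q)).2) := by rw [h]
    simpa [hkeyP] using h1
  have hinjA : Function.Injective keyA := by
    intro a b h
    have h1 := congrArg (fun z => (ofLex z).2) h
    simpa [hkeyA] using h1
  have h1 : PySem.List.sorted (groupRuns S) keyP = PySem.List.sorted (L.map fA) keyP :=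
    PySem.List.sorted_eq_sorted_of_perm _ _ keyP hinjP hGL
  have h2 : PySem.List.sorted (L.map fA) keyP = (PySem.List.sorted L keyA).map fA := by
    refine PySem.List.sorted_eq_of_perm_of_pairwise_lt _ _ keyP ((PySem.List.sorted_perm L keyA false).map fA) ?_
    rw [List.pairwise_map]
    exact sorted_strict L keyA (PySem.Set.nodup_ofList _) hinjA
  rw [h1, h2, List.map_map]
  have hsnd : (fun p : Int × String => p.2) ∘ fA = fun v => v := by funext v; rfl
  rw [hsnd, List.map_id']
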